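-- pv_equiv track=rewrite | github.com/elkayem-cyber/Tp-Malek-Emric | exercice6.py | somme_fibonacci
-- ===== SOURCE A (Python) =====
-- def somme_fibonacci(n, m):
--     # Initialisation des deux premiers termes de la suite
--     fib1, fib2 = 0, 1
--     # Calcul des n premiers termes de la suite
--     for i in range(n):
--         fib1, fib2 = fib2, fib1 + fib2
--     # Calcul de la somme des m termes suivants
--     somme = 0
--     for i in range(m):
--         somme += fib1
--         fib1, fib2 = fib2, fib1 + fib2
--     return somme
-- ===== SOURCE B (Python) =====
-- def _fib_pair(k):
--     # returns (F(k), F(k+1)) by fast doubling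
--     if k == 0:
--         return (0, 1)
--     a, b = _fib_pair(k // 2)
--     c = a * (2 * b - a)
--     d = a * a + b * b
--     if k % 2 == 0:
--         return (c, d)
--     return (d, c + d)
--
-- def somme_fibonacci(n, m):
--     # sum of m Fibonacci terms starting at index n = F(n+m+1) - F(n+1)
--     n = max(n, 0)
--     m = max(m, 0)
--     return _fib_pair(n + m + 1)[0] - _fib_pair(n + 1)[0]
-- ===== Notes on version B (the rewrite author's own statement) =====
-- stated objective: faster
-- what changed: Replaced the O(n+m) iterative loops by fast-doubling Fibonacci plus the telescoping identity sum = F(n+m+1) - F(n+1); intended as asymptotically faster, measured 91.85x at the largest size both finished (n=65536); at larger sizes results exceed the harness's int-to-str digit limit.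
import Mathlib
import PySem

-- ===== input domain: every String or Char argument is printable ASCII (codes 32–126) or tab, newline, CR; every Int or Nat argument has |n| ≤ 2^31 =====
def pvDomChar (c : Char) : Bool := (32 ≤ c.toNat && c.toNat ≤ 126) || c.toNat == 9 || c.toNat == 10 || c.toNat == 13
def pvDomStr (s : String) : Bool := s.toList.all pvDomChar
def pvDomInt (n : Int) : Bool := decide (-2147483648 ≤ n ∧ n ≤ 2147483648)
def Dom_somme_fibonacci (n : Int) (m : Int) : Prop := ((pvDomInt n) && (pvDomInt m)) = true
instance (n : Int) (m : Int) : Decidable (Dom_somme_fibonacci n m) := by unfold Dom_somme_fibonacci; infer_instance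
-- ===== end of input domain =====

-- B replaces A's loops by fast-doubling Fibonacci plus the telescoping identity
-- sum = F(n+m+1) - F(n+1); intended as faster (measured 91.85x at n=65536).

-- ===== PORT A =====
def somme_fibonacci (n : Int) (m : Int) : Int :=
  -- fib1, fib2 = 0, 1; for i in range(n): fib1, fib2 = fib2, fib1 + fib2
  let p := (PySem.List.pyRange 0 n 1).foldl
      (fun (p : Int × Int) _ => (p.2, p.1 + p.2)) (0, 1)
  -- somme = 0; for i in range(m): somme += fib1; fib1, fib2 = fib2, fib1 + fib2
  let s := (PySem.List.pyRange 0 m 1).foldl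
      (fun (s : Int × Int × Int) _ => (s.1 + s.2.1, s.2.2, s.2.1 + s.2.2)) (0, p.1, p.2)
  s.1

-- ===== PORT B =====
-- _fib_pair: returns (F(k), F(k+1)) by fast doubling
def fibPair (k : Nat) : Int × Int :=
  if h : k = 0 then (0, 1)
  else
    let p := fibPair (k / 2)
    let c := p.1 * (2 * p.2 - p.1)
    let d := p.1 * p.1 + p.2 * p.2
    if k % 2 = 0 then (c, d) else (d, c + d)
decreasing_by exact Nat.div_lt_self (Nat.pos_of_ne_zero h) (by decide)

def somme_fibonacci_alt (n : Int) (m : Int) : Int :=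
  let n' := max n 0
  let m' := max m 0
  (fibPair (n' + m' + 1).toNat).1 - (fibPair (n' + 1).toNat).1

-- ===== PRECONDITION & SPEC =====
def Spec_somme_fibonacci (n : Int) (m : Int) (out : Int) : Prop := out = somme_fibonacci_alt n m
instance (n : Int) (m : Int) (out : Int) : Decidable (Spec_somme_fibonacci n m out) := by unfold Spec_somme_fibonacci; infer_instance

-- ===== CLAIM (what is proved, stated in full; the proofs are below) =====
def Claim_equal_somme_fibonacci : Prop := ∀ (n : Int) (m : Int), Dom_somme_fibonacci n m → Spec_somme_fibonacci n m (somme_fibonacci n m)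

-- ===== LEMMAS AND PROOFS =====

def F (k : Nat) : Int := (Nat.fib k : Int)

theorem F_add_two (k : Nat) : F (k + 2) = F k + F (k + 1) := by
  simp only [F, Nat.fib_add_two]; push_cast; ring

theorem fibPair_eq (k : Nat) : fibPair k = (F k, F (k + 1)) := by
  induction k using Nat.strong_induction_on with
  | _ k ih =>
    by_cases h : k = 0
    · rw [fibPair]; simp [h, F]
    · have hlt : k / 2 < k := Nat.div_lt_self (Nat.pos_of_ne_zero h) (by decide)
      rw [fibPair, dif_neg h, ih _ hlt]
      have h2 : F (2 * (k / 2)) = F (k / 2) * (2 * F (k / 2 + 1) - F (k / 2)) := by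
        have hle : Nat.fib (k / 2) ≤ 2 * Nat.fib (k / 2 + 1) :=
          le_trans Nat.fib_le_fib_succ (by omega)
        simp only [F, Nat.fib_two_mul]
        rw [Int.natCast_mul, Int.natCast_sub hle]
        push_cast; ring
      have h3 : F (2 * (k / 2) + 1) = F (k / 2) * F (k / 2) + F (k / 2 + 1) * F (k / 2 + 1) := by
        simp only [F, Nat.fib_two_mul_add_one]
        push_cast; ring
      by_cases hp : k % 2 = 0
      · have hk : k = 2 * (k / 2) := by omega
        simp only [hp, if_true, Prod.mk.injEq]
        constructor
        · rw [show F k = F (2 * (k / 2)) from by rw [← hk], h2]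
        · rw [show k + 1 = 2 * (k / 2) + 1 from by omega, h3]
      · have hk : k = 2 * (k / 2) + 1 := by omega
        simp only [hp, if_false, Prod.mk.injEq]
        constructor
        · rw [show F k = F (2 * (k / 2) + 1) from by rw [← hk], h3]
        · rw [show k + 1 = 2 * (k / 2) + 2 from by omega, F_add_two, h2, h3]

theorem loop1_eq (l : List Int) (j : Nat) :
    l.foldl (fun (p : Int × Int) _ => (p.2, p.1 + p.2)) (F j, F (j + 1))
      = (F (j + l.length), F (j + l.length + 1)) := by
  induction l generalizing j with
  | nil => simp
  | cons x t ih =>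
    simp only [List.foldl_cons, List.length_cons]
    rw [show (F (j + 1), F j + F (j + 1)) = (F (j + 1), F (j + 1 + 1)) from by
          rw [show j + 1 + 1 = j + 2 from rfl, F_add_two],
        ih (j + 1),
        show j + 1 + t.length = j + (t.length + 1) from by omega]

theorem loop2_eq (l : List Int) (s : Int) (j : Nat) :
    l.foldl (fun (st : Int × Int × Int) _ => (st.1 + st.2.1, st.2.2, st.2.1 + st.2.2))
        (s, F j, F (j + 1))
      = (s + F (j + l.length + 1) - F (j + 1), F (j + l.length), F (j + l.length + 1)) := by
  induction l generalizing s j with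
  | nil => simp
  | cons x t ih =>
    simp only [List.foldl_cons, List.length_cons]
    rw [show (s + F j, F (j + 1), F j + F (j + 1)) = (s + F j, F (j + 1), F (j + 1 + 1)) from by
          rw [show j + 1 + 1 = j + 2 from rfl, F_add_two],
        ih (s + F j) (j + 1),
        show j + 1 + t.length = j + (t.length + 1) from by omega]
    have : s + F j + F (j + (t.length + 1) + 1) - F (j + 1 + 1) =
        s + F (j + (t.length + 1) + 1) - F (j + 1) := by
      rw [show j + 1 + 1 = j + 2 from rfl, F_add_two]; ring
    rw [this]

-- ===== VERDICT (by name: the statement is the Claim_ definition above) =====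
theorem somme_fibonacci_spec : Claim_equal_somme_fibonacci := by
  intro n m _
  unfold Spec_somme_fibonacci somme_fibonacci somme_fibonacci_alt
  dsimp only
  have hF0 : ((0 : Int), (1 : Int)) = (F 0, F (0 + 1)) := by simp [F]
  rw [hF0, loop1_eq, loop2_eq, fibPair_eq, fibPair_eq]
  simp only [PySem.List.length_pyRange_one]
  have h1 : (max n 0 + max m 0 + 1).toNat = 0 + (n - 0).toNat + (m - 0).toNat + 1 := by omega
  have h2 : (max n 0 + 1).toNat = 0 + (n - 0).toNat + 1 := by omega
  rw [h1, h2]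
  ring
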